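-- pv_equiv track=rewrite | github.com/pypi-data/pypi-mirror-20 | packages/cntalib/cntalib-20170310.tar.gz/cntalib-20170310/cntalib/Reference/Reference.py | SUMBARS_single
-- ===== SOURCE A (Python) =====
-- def SUMBARS_single(X,A):
--     ln_x=len(X)-1
--     i=ln_x-1
--     out=0
--     while(i>=0):
--         s=sum(X[(i):])
--         if s >=A :
--             out=len(X)-i
--             break
--         i=i-1
--     return out
-- ===== SOURCE B (Python) =====
-- def SUMBARS_single(X, A):
--     n = len(X)
--     if n < 2:
--         return 0
--     s = X[-1]
--     for k in range(2, n + 1):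
--         s += X[-k]
--         if s >= A:
--             return k
--     return 0
-- ===== Notes on version B (the rewrite author's own statement) =====
-- stated objective: alternative
-- what changed: Replaced A's loop that recomputes sum(X[i:]) from scratch at every index by a single backward pass (k = 2..len) that maintains a running suffix sum; worst-case O(n) instead of O(n^2), though A's early exit makes typical inputs comparable, so no speed is claimed.
import Mathlib
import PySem

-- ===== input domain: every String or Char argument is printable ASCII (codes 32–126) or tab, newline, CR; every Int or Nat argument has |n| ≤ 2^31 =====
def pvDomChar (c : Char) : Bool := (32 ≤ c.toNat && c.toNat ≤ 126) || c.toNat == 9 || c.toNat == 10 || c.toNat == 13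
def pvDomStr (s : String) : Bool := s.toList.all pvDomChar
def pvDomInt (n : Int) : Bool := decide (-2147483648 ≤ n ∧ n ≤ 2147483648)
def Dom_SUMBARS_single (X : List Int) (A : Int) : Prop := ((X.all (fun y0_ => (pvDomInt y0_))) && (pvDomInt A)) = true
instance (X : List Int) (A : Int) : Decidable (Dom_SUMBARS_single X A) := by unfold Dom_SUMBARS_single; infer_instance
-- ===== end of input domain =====

-- B replaces A's "re-sum the whole suffix at every index" loop by a single backward
-- pass carrying a running suffix sum (a different algorithm); return values identical.

-- ===== PORT A =====
-- A's while loop: i counts down from len(X)-2; each iteration recomputes sum(X[i:]).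
def SUMBARS_single_loopA (X : List Int) (A : Int) (i : Int) : Int :=
  if h : 0 ≤ i then
    let s := (PySem.List.slice X (some i) none).sum
    if s ≥ A then (X.length : Int) - i
    else SUMBARS_single_loopA X A (i - 1)
  else 0
termination_by (i + 1).toNat
decreasing_by omega

def SUMBARS_single (X : List Int) (A : Int) : Int :=
  SUMBARS_single_loopA X A (((X.length : Int) - 1) - 1)

-- ===== PORT B =====
-- B's for loop over k = 2 .. len(X), carrying the running sum s of the last k-1 elements.
-- X[-k] is in range here (2 ≤ k ≤ len X), so pyGet? returns some; .getD 0 just unwraps it.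
def SUMBARS_single_loopB (X : List Int) (A : Int) (k : Nat) (s : Int) : Int :=
  if h : k ≤ X.length then
    let s' := s + (PySem.List.pyGet? X (-(k : Int))).getD 0
    if s' ≥ A then (k : Int)
    else SUMBARS_single_loopB X A (k + 1) s'
  else 0
termination_by X.length + 1 - k

def SUMBARS_single_alt (X : List Int) (A : Int) : Int :=
  if X.length < 2 then 0
  else SUMBARS_single_loopB X A 2 ((PySem.List.pyGet? X (-1)).getD 0)

-- ===== PRECONDITION & SPEC =====
def Spec_SUMBARS_single (X : List Int) (A : Int) (out : Int) : Prop := out = SUMBARS_single_alt X A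
instance (X : List Int) (A : Int) (out : Int) : Decidable (Spec_SUMBARS_single X A out) := by unfold Spec_SUMBARS_single; infer_instance

-- ===== CLAIM (what is proved, stated in full; the proofs are below) =====
def Claim_equal_SUMBARS_single : Prop := ∀ (X : List Int) (A : Int), Dom_SUMBARS_single X A → Spec_SUMBARS_single X A (SUMBARS_single X A)

-- ===== LEMMAS AND PROOFS =====

theorem loopA_neg (X : List Int) (A : Int) (i : Int) (h : i < 0) :
    SUMBARS_single_loopA X A i = 0 := by
  rw [SUMBARS_single_loopA]
  simp [not_le.mpr h]

theorem loopB_past (X : List Int) (A : Int) (k : Nat) (s : Int) (h : X.length < k) :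
    SUMBARS_single_loopB X A k s = 0 := by
  rw [SUMBARS_single_loopB]
  simp [Nat.not_le.mpr h]

-- the two loops march over the same suffixes in the same order: A's index i corresponds
-- to B's count k = len - i, and B's accumulator equals the sum of the last k-1 elements.
theorem loop_agree (X : List Int) (A : Int) :
    ∀ (j : Nat), j + 2 ≤ X.length →
      SUMBARS_single_loopA X A (j : Int)
        = SUMBARS_single_loopB X A (X.length - j) ((X.drop (j + 1)).sum) := by
  intro j
  induction j with
  | zero =>
    intro hj
    rw [SUMBARS_single_loopA, SUMBARS_single_loopB]
    have hk : X.length - 0 ≤ X.length := by omega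
    have hslice : PySem.List.slice X (some ((0:Nat) : Int)) none = X.drop 0 :=
      PySem.List.slice_from_natCast X 0
    have hget : PySem.List.pyGet? X (-((X.length - 0 : Nat) : Int)) = X[X.length - (X.length - 0)]? :=
      PySem.List.pyGet?_neg_natCast X _ (by omega) (by omega)
    have hx0 : X[X.length - (X.length - 0)]? = X[0]? := by simp
    have hsum : (X.drop (0 + 1)).sum + (X[0]?.getD 0) = X.sum := by
      rcases X with _ | ⟨x, xs⟩
      · simp at hj
      · simp [List.sum_cons]; ring
    simp only [hslice, hget, hx0, dif_pos (by omega : (0:Int) ≤ (0:Nat)), dif_pos hk]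
    rw [hsum]
    simp only [List.drop_zero]
    by_cases hs : X.sum ≥ A
    · simp [hs]
    · simp only [if_neg hs]
      rw [loopA_neg _ _ _ (by omega), loopB_past _ _ _ _ (by omega)]
  | succ j ih =>
    intro hj
    rw [SUMBARS_single_loopA, SUMBARS_single_loopB]
    have hk : X.length - (j + 1) ≤ X.length := by omega
    have hslice : PySem.List.slice X (some ((j + 1 : Nat) : Int)) none = X.drop (j + 1) :=
      PySem.List.slice_from_natCast X (j + 1)
    have hget : PySem.List.pyGet? X (-((X.length - (j + 1) : Nat) : Int))
        = X[X.length - (X.length - (j + 1))]? :=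
      PySem.List.pyGet?_neg_natCast X _ (by omega) (by omega)
    have hidx : X.length - (X.length - (j + 1)) = j + 1 := by omega
    have hlt : j + 1 < X.length := by omega
    have hsum : (X.drop (j + 1 + 1)).sum + (X[j + 1]?.getD 0) = (X.drop (j + 1)).sum := by
      rw [List.getElem?_eq_getElem hlt, List.drop_eq_getElem_cons hlt]
      simp only [Option.getD_some, List.sum_cons]
      ring
    have hcast : (((j + 1 : Nat) : Int)) = (j : Int) + 1 := by push_cast; ring
    simp only [hslice, hget, hidx, dif_pos (by omega : (0:Int) ≤ ((j+1 : Nat) : Int)), dif_pos hk]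
    rw [hsum]
    by_cases hs : (X.drop (j + 1)).sum ≥ A
    · simp [hs]; omega
    · simp only [if_neg hs]
      have hstep : X.length - (j + 1) + 1 = X.length - j := by omega
      have harg : ((j + 1 : Nat) : Int) - 1 = (j : Int) := by push_cast; ring
      rw [harg, hstep, ih (by omega)]

-- ===== VERDICT (by name: the statement is the Claim_ definition above) =====
theorem SUMBARS_single_spec : Claim_equal_SUMBARS_single := by
  unfold Claim_equal_SUMBARS_single
  intro X A _
  unfold Spec_SUMBARS_single SUMBARS_single SUMBARS_single_alt
  by_cases hlen : X.length < 2
  · rw [loopA_neg _ _ _ (by omega)]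
    simp [hlen]
  · rw [not_lt] at hlen
    have hj : (X.length - 2) + 2 ≤ X.length := by omega
    have h1 : ((X.length : Int) - 1) - 1 = ((X.length - 2 : Nat) : Int) := by omega
    have h2 : X.length - (X.length - 2) = 2 := by omega
    have h3 : X.drop (X.length - 2 + 1) = X.drop (X.length - 1) := by
      congr 1; omega
    have hlast : (X.drop (X.length - 1)).sum = (PySem.List.pyGet? X (-1)).getD 0 := by
      rw [PySem.List.pyGet?_neg_one]
      rcases X.eq_nil_or_concat with rfl | ⟨ys, y, rfl⟩
      · simp at hlen
      · simp
    rw [h1, loop_agree X A _ hj, h2, h3, hlast]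
    simp [Nat.not_lt.mpr hlen]
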